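-- pv_equiv track=rewrite | github.com/OpenEPaperLink/OpenEPaperLink | ARM_Tag_FW/OpenEPaperLink_TLSR/tools/TlsrComProg.py | sws_code_blk
-- ===== SOURCE A (Python) =====
-- def sws_code_blk(blk):
-- 	pkt=[]
-- 	d = bytearray([0xe8,0xef,0xef,0xef,0xef])
-- 	for el in blk:
-- 		if (el & 0x80) != 0:
-- 			d[0] &= 0x0f
-- 		if (el & 0x40) != 0:
-- 			d[1] &= 0xe8
-- 		if (el & 0x20) != 0:
-- 			d[1] &= 0x0f
-- 		if (el & 0x10) != 0:
-- 			d[2] &= 0xe8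
-- 		if (el & 0x08) != 0:
-- 			d[2] &= 0x0f
-- 		if (el & 0x04) != 0:
-- 			d[3] &= 0xe8
-- 		if (el & 0x02) != 0:
-- 			d[3] &= 0x0f
-- 		if (el & 0x01) != 0:
-- 			d[4] &= 0xe8
-- 		pkt += d
-- 		d = bytearray([0xef,0xef,0xef,0xef,0xef])
-- 	return pkt
-- ===== SOURCE B (Python) =====
-- # Table-driven re-implementation: one 256-entry lookup table replaces the
-- # per-element bit-masking chain; the first byte is patched once at the end.
-- _M = [0xEF, 0x0F, 0xE8, 0x08]
-- _T = [[_M[(v >> 7) & 1], _M[(v >> 5) & 3], _M[(v >> 3) & 3],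
--        _M[(v >> 1) & 3], _M[(v & 1) << 1]] for v in range(256)]
--
-- def sws_code_blk(blk):
-- 	pkt = []
-- 	for el in blk:
-- 		pkt.extend(_T[el & 0xFF])
-- 	if pkt:
-- 		pkt[0] = 0x08 if blk[0] & 0x80 else 0xE8
-- 	return pkt
-- ===== Notes on version B (the rewrite author's own statement) =====
-- stated objective: idiomatic
-- what changed: Replaces the per-element chain of eight conditional in-place bit-mask updates by a precomputed 256-entry lookup table flat-extended per byte, with the first packet's 0xe8-based lead byte patched once at the end.
import Mathlib
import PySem

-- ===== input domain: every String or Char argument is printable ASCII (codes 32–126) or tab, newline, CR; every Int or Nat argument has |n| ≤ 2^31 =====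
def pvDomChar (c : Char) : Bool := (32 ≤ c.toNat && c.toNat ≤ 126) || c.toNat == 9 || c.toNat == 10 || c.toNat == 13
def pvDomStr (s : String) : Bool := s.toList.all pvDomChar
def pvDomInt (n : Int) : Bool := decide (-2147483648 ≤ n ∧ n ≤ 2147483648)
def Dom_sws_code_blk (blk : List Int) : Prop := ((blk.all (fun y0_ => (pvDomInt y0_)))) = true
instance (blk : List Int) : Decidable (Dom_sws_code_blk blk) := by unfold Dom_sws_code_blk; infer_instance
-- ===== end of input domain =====

-- B replaces A's per-element chain of eight conditional bit-mask updates by a precomputed 256-entry lookup table; same O(n) cost, return values proved equal on all inputs.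

-- ===== PORT A =====
-- the loop body: the eight conditional in-place updates of d (Python's `el & c` is PySem.Int.band)
def swsMask (el : Int) (d : List Int) : List Int :=
  let d := if PySem.Int.band el 0x80 ≠ 0 then d.set 0 (PySem.Int.band (d.getD 0 0) 0x0f) else d
  let d := if PySem.Int.band el 0x40 ≠ 0 then d.set 1 (PySem.Int.band (d.getD 1 0) 0xe8) else d
  let d := if PySem.Int.band el 0x20 ≠ 0 then d.set 1 (PySem.Int.band (d.getD 1 0) 0x0f) else d
  let d := if PySem.Int.band el 0x10 ≠ 0 then d.set 2 (PySem.Int.band (d.getD 2 0) 0xe8) else d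
  let d := if PySem.Int.band el 0x08 ≠ 0 then d.set 2 (PySem.Int.band (d.getD 2 0) 0x0f) else d
  let d := if PySem.Int.band el 0x04 ≠ 0 then d.set 3 (PySem.Int.band (d.getD 3 0) 0xe8) else d
  let d := if PySem.Int.band el 0x02 ≠ 0 then d.set 3 (PySem.Int.band (d.getD 3 0) 0x0f) else d
  let d := if PySem.Int.band el 0x01 ≠ 0 then d.set 4 (PySem.Int.band (d.getD 4 0) 0xe8) else d
  d

-- the for-loop: state is (pkt, d); d is reset to the 0xef base after each element
def swsGo (pkt : List Int) (d : List Int) : List Int → List Int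
  | [] => pkt
  | el :: rest => swsGo (pkt ++ swsMask el d) [0xef, 0xef, 0xef, 0xef, 0xef] rest

def sws_code_blk (blk : List Int) : List Int :=
  swsGo [] [0xe8, 0xef, 0xef, 0xef, 0xef] blk

-- ===== PORT B =====
def swsM : List Int := [0xef, 0x0f, 0xe8, 0x08]

def swsT : List (List Int) :=
  (List.range 256).map (fun v =>
    [swsM.getD ((v >>> 7) &&& 1) 0, swsM.getD ((v >>> 5) &&& 3) 0,
     swsM.getD ((v >>> 3) &&& 3) 0, swsM.getD ((v >>> 1) &&& 3) 0,
     swsM.getD ((v &&& 1) <<< 1) 0])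

def sws_code_blk_alt (blk : List Int) : List Int :=
  let pkt := blk.foldl (fun pkt el => pkt ++ swsT.getD (PySem.Int.band el 0xff).toNat []) []
  if pkt = [] then pkt
  else pkt.set 0 (if PySem.Int.band (blk.headD 0) 0x80 ≠ 0 then 0x08 else 0xe8)

-- ===== PRECONDITION & SPEC =====
def Spec_sws_code_blk (blk : List Int) (out : List Int) : Prop := out = sws_code_blk_alt blk
instance (blk : List Int) (out : List Int) : Decidable (Spec_sws_code_blk blk out) := by unfold Spec_sws_code_blk; infer_instance

-- ===== CLAIM (what is proved, stated in full; the proofs are below) =====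
def Claim_equal_sws_code_blk : Prop := ∀ (blk : List Int), Dom_sws_code_blk blk → Spec_sws_code_blk blk (sws_code_blk blk)

-- ===== LEMMAS AND PROOFS =====

-- a number < 256 only looks at the low byte of its &-partner
theorem sws_nat_and_low8 (x k : Nat) (hx : x < 256) : x &&& k = x &&& (k % 256) := by
  apply Nat.eq_of_testBit_eq
  intro j
  rw [Nat.testBit_and, Nat.testBit_and]
  by_cases hj : j < 8
  · have h256 : (256 : Nat) = 2 ^ 8 := by norm_num
    rw [h256, Nat.testBit_mod_two_pow]
    simp [hj]
  · have hstep : (256 : Nat) ≤ 2 ^ j := by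
      calc (256 : Nat) = 2 ^ 8 := by norm_num
        _ ≤ 2 ^ j := Nat.pow_le_pow_right (by norm_num) (by omega)
    have hxb : x.testBit j = false :=
      Nat.testBit_eq_false_of_lt (Nat.lt_of_lt_of_le hx hstep)
    simp [hxb]

-- band a c is determined by the low byte of a, for each single-bit mask c
theorem sws_band_low_bit (a : Int) (c : Nat) (hc2 : c < 256)
    (hpos : ∀ m0 : Fin 256, (255 &&& m0.val) &&& c = c &&& m0.val)
    (hneg : ∀ k0 : Fin 256, (255 - (255 &&& k0.val)) &&& c = c - (c &&& k0.val)) :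
    PySem.Int.band a (c : Int) = PySem.Int.band (PySem.Int.band a 255) (c : Int) := by
  have e : (255 : Int).toNat = 255 := rfl
  by_cases h : 0 ≤ a
  · have h1 : PySem.Int.band a (c : Int) = ((a.toNat &&& c : Nat) : Int) := by
      rw [PySem.Int.band_of_nonneg h (Int.natCast_nonneg c)]
      simp only [Int.toNat_natCast]
    have h255 : PySem.Int.band a 255 = ((a.toNat &&& 255 : Nat) : Int) := by
      rw [PySem.Int.band_of_nonneg h (by norm_num), e]
    have h2 : PySem.Int.band (PySem.Int.band a 255) (c : Int)
        = (((a.toNat &&& 255) &&& c : Nat) : Int) := by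
      rw [h255, PySem.Int.band_natCast]
    rw [h1, h2]
    set m := a.toNat with hm
    have hm0 : m % 256 < 256 := Nat.mod_lt _ (by norm_num)
    have : (m &&& 255) &&& c = m &&& c := by
      calc (m &&& 255) &&& c
          = (255 &&& m) &&& c := by rw [Nat.and_comm m 255]
        _ = (255 &&& m % 256) &&& c := by rw [sws_nat_and_low8 255 m (by norm_num)]
        _ = c &&& m % 256 := hpos ⟨m % 256, hm0⟩
        _ = c &&& m := (sws_nat_and_low8 c m hc2).symm
        _ = m &&& c := Nat.and_comm c m
    rw [this]
  · have hA : PySem.Int.band a (c : Int) = ((c - (c &&& (-a - 1).toNat) : Nat) : Int) := by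
      unfold PySem.Int.band
      rw [if_neg h, if_pos (Int.natCast_nonneg c)]
      simp only [Int.toNat_natCast]
    have h255 : PySem.Int.band a 255 = ((255 - (255 &&& (-a - 1).toNat) : Nat) : Int) := by
      unfold PySem.Int.band
      rw [if_neg h, if_pos (by norm_num), e]
    have hB : PySem.Int.band (PySem.Int.band a 255) (c : Int)
        = (((255 - (255 &&& (-a - 1).toNat)) &&& c : Nat) : Int) := by
      rw [h255, PySem.Int.band_natCast]
    rw [hA, hB]
    set k := (-a - 1).toNat with hk
    have hk0 : k % 256 < 256 := Nat.mod_lt _ (by norm_num)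
    have : (255 - (255 &&& k)) &&& c = c - (c &&& k) := by
      calc (255 - (255 &&& k)) &&& c
          = (255 - (255 &&& k % 256)) &&& c := by rw [sws_nat_and_low8 255 k (by norm_num)]
        _ = c - (c &&& k % 256) := hneg ⟨k % 256, hk0⟩
        _ = c - (c &&& k) := by rw [← sws_nat_and_low8 c k hc2]
    rw [this]

theorem sws_band255_nonneg (a : Int) : 0 ≤ PySem.Int.band a 255 := by
  unfold PySem.Int.band
  split_ifs with h1 h2 h2 <;> first | exact Int.natCast_nonneg _ | omega

theorem sws_band255_lt (a : Int) : PySem.Int.band a 255 < 256 := by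
  have e : (255 : Int).toNat = 255 := rfl
  unfold PySem.Int.band
  split_ifs with h1 h2 h2
  · rw [e]
    have hle : a.toNat &&& 255 ≤ 255 := Nat.and_le_right
    omega
  · omega
  · rw [e]
    have hle : 255 - (255 &&& (-a - 1).toNat) ≤ 255 := Nat.sub_le _ _
    omega
  · omega

-- the 256-entry table agrees with A's mask chain on the 0xef base …
set_option maxRecDepth 16384 in
theorem sws_tableEF : ∀ n : Fin 256,
    swsMask ((n.val : Nat) : Int) [0xef, 0xef, 0xef, 0xef, 0xef] = swsT.getD n.val [] := by
  decide

-- … and on the first element's 0xe8 base, up to the byte-0 patch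
set_option maxRecDepth 16384 in
theorem sws_tableE8 : ∀ n : Fin 256,
    swsMask ((n.val : Nat) : Int) [0xe8, 0xef, 0xef, 0xef, 0xef] =
      (swsT.getD n.val []).set 0
        (if PySem.Int.band ((n.val : Nat) : Int) 0x80 ≠ 0 then 0x08 else 0xe8) := by
  decide

set_option maxRecDepth 16384 in
theorem sws_tableLen : ∀ n : Fin 256, (swsT.getD n.val []).length = 5 := by
  decide

-- the mask chain only looks at the low byte of its element
set_option maxRecDepth 16384 in
theorem sws_mask_low (el : Int) (d : List Int) :
    swsMask (PySem.Int.band el 255) d = swsMask el d := by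
  have h128 := sws_band_low_bit el 128 (by norm_num) (by decide) (by decide)
  have h64 := sws_band_low_bit el 64 (by norm_num) (by decide) (by decide)
  have h32 := sws_band_low_bit el 32 (by norm_num) (by decide) (by decide)
  have h16 := sws_band_low_bit el 16 (by norm_num) (by decide) (by decide)
  have h8 := sws_band_low_bit el 8 (by norm_num) (by decide) (by decide)
  have h4 := sws_band_low_bit el 4 (by norm_num) (by decide) (by decide)
  have h2 := sws_band_low_bit el 2 (by norm_num) (by decide) (by decide)
  have h1 := sws_band_low_bit el 1 (by norm_num) (by decide) (by decide)
  push_cast at h128 h64 h32 h16 h8 h4 h2 h1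
  simp only [swsMask, ← h128, ← h64, ← h32, ← h16, ← h8, ← h4, ← h2, ← h1]

theorem sws_encEF (el : Int) :
    swsMask el [0xef, 0xef, 0xef, 0xef, 0xef] =
      swsT.getD (PySem.Int.band el 255).toNat [] := by
  have hn : (PySem.Int.band el 255).toNat < 256 := by
    have := sws_band255_lt el
    have := sws_band255_nonneg el
    omega
  have hcast : (((PySem.Int.band el 255).toNat : Nat) : Int) = PySem.Int.band el 255 :=
    Int.toNat_of_nonneg (sws_band255_nonneg el)
  have h := sws_tableEF ⟨(PySem.Int.band el 255).toNat, hn⟩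
  rw [hcast, sws_mask_low] at h
  exact h

set_option maxRecDepth 16384 in
theorem sws_encE8 (el : Int) :
    swsMask el [0xe8, 0xef, 0xef, 0xef, 0xef] =
      (swsT.getD (PySem.Int.band el 255).toNat []).set 0
        (if PySem.Int.band el 0x80 ≠ 0 then 0x08 else 0xe8) := by
  have hn : (PySem.Int.band el 255).toNat < 256 := by
    have := sws_band255_lt el
    have := sws_band255_nonneg el
    omega
  have hcast : (((PySem.Int.band el 255).toNat : Nat) : Int) = PySem.Int.band el 255 :=
    Int.toNat_of_nonneg (sws_band255_nonneg el)
  have h128 := sws_band_low_bit el 128 (by norm_num) (by decide) (by decide)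
  push_cast at h128
  have h := sws_tableE8 ⟨(PySem.Int.band el 255).toNat, hn⟩
  rw [hcast, sws_mask_low, ← h128] at h
  exact h

theorem sws_goEF (rest : List Int) (pkt : List Int) :
    swsGo pkt [0xef, 0xef, 0xef, 0xef, 0xef] rest =
      pkt ++ rest.flatMap (fun el => swsT.getD (PySem.Int.band el 255).toNat []) := by
  induction rest generalizing pkt with
  | nil => simp [swsGo]
  | cons el r ih =>
      rw [swsGo, ih, sws_encEF]
      simp

theorem sws_code_blk_spec : Claim_equal_sws_code_blk := by
  intro blk _
  unfold Spec_sws_code_blk sws_code_blk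
  cases blk with
  | nil => rfl
  | cons el rest =>
      have hn : (PySem.Int.band el 255).toNat < 256 := by
        have := sws_band255_lt el
        have := sws_band255_nonneg el
        omega
      have hlen : (swsT.getD (PySem.Int.band el 255).toNat []).length = 5 :=
        sws_tableLen ⟨(PySem.Int.band el 255).toNat, hn⟩
      obtain ⟨a, t, hat⟩ : ∃ a t, swsT.getD (PySem.Int.band el 255).toNat [] = a :: t := by
        cases h : swsT.getD (PySem.Int.band el 255).toNat [] with
        | nil => rw [h] at hlen; simp at hlen
        | cons a t => exact ⟨a, t, rfl⟩
      have hA : swsGo [] [0xe8, 0xef, 0xef, 0xef, 0xef] (el :: rest) =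
          swsMask el [0xe8, 0xef, 0xef, 0xef, 0xef] ++
            rest.flatMap (fun e => swsT.getD (PySem.Int.band e 255).toNat []) := by
        rw [swsGo, sws_goEF]
        simp
      rw [hA, sws_encE8]
      simp only [sws_code_blk_alt, PySem.List.foldl_append_eq_flatMap, List.flatMap_cons,
        List.nil_append, List.headD_cons]
      rw [hat]
      simp [List.set_cons_zero]
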